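-- pv_equiv track=rewrite | github.com/peppocola/AoC19 | day4.py | repeating2
-- ===== SOURCE A (Python) =====
-- def repeating2(a):
--     i = 0
--     repetition = 0
--     while i < (len(a) - 1):
--
--         if repetition == 1:
--             if a[i] == a[i + 1]:
--                 repetition = 0
--                 i += 1
--                 while i < len(a) and a[i] == a[i - 1]:
--                     i += 1
--             else:
--                 return 1
--
--         if (i < (len(a) - 1)) and (a[i] == a[i + 1]):
--             repetition = 1
--
--         i += 1
--
--     return repetition
-- ===== SOURCE B (Python) =====
-- def repeating2(a):
--     i = 0
--     n = len(a)
--     while i < n: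
--         j = i
--         while j < n and a[j] == a[i]:
--             j += 1
--         if j - i == 2:
--             return 1
--         i = j
--     return 0
-- ===== Notes on version B (the rewrite author's own statement) =====
-- stated objective: simpler
-- what changed: Replaces A's one-step state machine (a 'repetition' flag plus a mid-loop run-skipping inner while and an early return) by a plain decomposition into maximal runs: for each run start i, advance j to the run end and return 1 as soon as a run has length exactly 2.
import Mathlib
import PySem

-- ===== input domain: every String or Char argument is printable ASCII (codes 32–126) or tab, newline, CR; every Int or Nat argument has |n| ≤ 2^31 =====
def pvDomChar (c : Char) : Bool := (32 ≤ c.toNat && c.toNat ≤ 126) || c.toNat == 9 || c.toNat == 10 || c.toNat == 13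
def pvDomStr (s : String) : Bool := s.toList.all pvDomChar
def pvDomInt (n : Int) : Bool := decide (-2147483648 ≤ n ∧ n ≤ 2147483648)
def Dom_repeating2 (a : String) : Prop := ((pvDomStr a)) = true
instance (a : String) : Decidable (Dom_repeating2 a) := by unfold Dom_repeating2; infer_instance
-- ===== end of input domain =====

-- B replaces A's repetition-flag state machine (with inner run-skipping while and early return)
-- by a plain decomposition into maximal runs, returning 1 iff some run has length exactly 2 (simpler).


-- ===== PORT A =====
-- inner `while i < len(a) and a[i] == a[i-1]: i += 1`  (all indexed accesses are in range in A)
def innerA (l : List Char) (i : Nat) : Nat :=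
  if i < l.length ∧ l.getD i ' ' = l.getD (i - 1) ' ' then innerA l (i + 1) else i
termination_by l.length - i
decreasing_by omega

theorem innerA_ge_fuel (l : List Char) : ∀ k i, l.length - i ≤ k → i ≤ innerA l i := by
  intro k
  induction k with
  | zero =>
    intro i h
    unfold innerA
    rw [if_neg (by omega)]
  | succ k ih =>
    intro i h
    unfold innerA
    split
    · have := ih (i + 1) (by omega); omega
    · exact Nat.le_refl i

theorem innerA_ge (l : List Char) (i : Nat) : i ≤ innerA l i :=
  innerA_ge_fuel l (l.length - i) i (Nat.le_refl _)

-- outer `while i < len(a) - 1` of A, with the repetition flag as a parameter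
def loopA (l : List Char) (i : Nat) (rep : Int) : Int :=
  if i < l.length - 1 then
    if rep = 1 then
      if l.getD i ' ' = l.getD (i + 1) ' ' then
        -- repetition = 0; i += 1; inner while; then the common tail of the loop body
        let i' := innerA l (i + 1)
        if i' < l.length - 1 ∧ l.getD i' ' ' = l.getD (i' + 1) ' ' then loopA l (i' + 1) 1
        else loopA l (i' + 1) 0
      else 1
    else
      if i < l.length - 1 ∧ l.getD i ' ' = l.getD (i + 1) ' ' then loopA l (i + 1) 1
      else loopA l (i + 1) rep
  else rep
termination_by l.length - i
decreasing_by
  · have := innerA_ge l (i + 1); omega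
  · have := innerA_ge l (i + 1); omega
  · omega
  · omega

def repeating2 (a : String) : Int := loopA a.toList 0 0

-- ===== PORT B =====
-- inner `while j < n and a[j] == a[i]: j += 1`
def runB (l : List Char) (i j : Nat) : Nat :=
  if j < l.length ∧ l.getD j ' ' = l.getD i ' ' then runB l i (j + 1) else j
termination_by l.length - j
decreasing_by omega

theorem runB_ge_fuel (l : List Char) (i : Nat) : ∀ k j, l.length - j ≤ k → j ≤ runB l i j := by
  intro k
  induction k with
  | zero =>
    intro j h
    unfold runB
    rw [if_neg (by omega)]
  | succ k ih =>
    intro j h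
    unfold runB
    split
    · have := ih (j + 1) (by omega); omega
    · exact Nat.le_refl j

theorem runB_ge (l : List Char) (i j : Nat) : j ≤ runB l i j :=
  runB_ge_fuel l i (l.length - j) j (Nat.le_refl _)

theorem runB_self_gt (l : List Char) (i : Nat) (h : i < l.length) : i < runB l i i := by
  unfold runB; rw [if_pos ⟨h, rfl⟩]; have := runB_ge l i (i + 1); omega

-- outer `while i < n` of B
def loopB (l : List Char) (i : Nat) : Int :=
  if h : i < l.length then
    let j := runB l i i
    if j - i = 2 then 1 else loopB l j
  else 0
termination_by l.length - i
decreasing_by have := runB_self_gt l i h; omega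

def repeating2_alt (a : String) : Int := loopB a.toList 0

-- ===== PRECONDITION & SPEC =====
def Spec_repeating2 (a : String) (out : Int) : Prop := out = repeating2_alt a
instance (a : String) (out : Int) : Decidable (Spec_repeating2 a out) := by unfold Spec_repeating2; infer_instance

-- ===== CLAIM (what is proved, stated in full; the proofs are below) =====
def Claim_equal_repeating2 : Prop := ∀ (a : String), Dom_repeating2 a → Spec_repeating2 a (repeating2 a)

-- ===== LEMMAS AND PROOFS =====

-- once inside a run of the character l[i], B's run scan and A's inner while agree
theorem runB_eq_innerA_fuel (l : List Char) (i : Nat) :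
    ∀ k j, l.length - j ≤ k → l.getD (j - 1) ' ' = l.getD i ' ' → runB l i j = innerA l j := by
  intro k
  induction k with
  | zero =>
    intro j hk _
    conv_lhs => rw [runB]
    conv_rhs => rw [innerA]
    rw [if_neg (by omega), if_neg (by omega)]
  | succ k ih =>
    intro j hk hrun
    conv_lhs => rw [runB]
    conv_rhs => rw [innerA]
    by_cases hj : j < l.length ∧ l.getD j ' ' = l.getD i ' '
    · rw [if_pos hj, if_pos ⟨hj.1, by rw [hj.2, hrun]⟩]
      exact ih (j + 1) (by omega) (by simpa using hj.2)
    · rw [if_neg hj, if_neg ?_]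
      intro ⟨h1, h2⟩
      exact hj ⟨h1, by rw [h2, hrun]⟩

theorem runB_eq_innerA (l : List Char) (i j : Nat)
    (hrun : l.getD (j - 1) ' ' = l.getD i ' ') : runB l i j = innerA l j :=
  runB_eq_innerA_fuel l i (l.length - j) j (Nat.le_refl _) hrun

-- the common tail of A's loop body at index j equals a fresh iteration at j with flag 0
theorem loopA_restart (l : List Char) (j : Nat) :
    (if j < l.length - 1 ∧ l.getD j ' ' = l.getD (j + 1) ' ' then loopA l (j + 1) 1
     else loopA l (j + 1) 0) = loopA l j 0 := by
  conv_rhs => rw [loopA]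
  by_cases hj : j < l.length - 1
  · rw [if_pos hj, if_neg (show ¬((0 : Int) = 1) by norm_num)]
  · rw [if_neg hj, if_neg (by intro h; exact hj h.1)]
    conv_lhs => rw [loopA]
    rw [if_neg (by omega)]

-- A's outer loop with flag 0 equals B's outer loop, at every index
theorem loopA_eq_loopB_fuel (l : List Char) :
    ∀ k i, l.length - i ≤ k → loopA l i 0 = loopB l i := by
  intro k
  induction k with
  | zero =>
    intro i hk
    conv_lhs => rw [loopA]
    conv_rhs => rw [loopB]
    rw [if_neg (by omega), dif_neg (by omega)]
  | succ k ih =>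
    intro i hk
    by_cases hlt : i < l.length - 1
    · have hn : i + 1 < l.length := by omega
      have s1 : runB l i i = runB l i (i + 1) := by
        conv_lhs => rw [runB]
        rw [if_pos ⟨by omega, rfl⟩]
      by_cases hpair : l.getD i ' ' = l.getD (i + 1) ' '
      · have hA : loopA l i 0 = loopA l (i + 1) 1 := by
          conv_lhs => rw [loopA]
          rw [if_pos hlt, if_neg (by norm_num), if_pos ⟨hlt, hpair⟩]
        have s2 : runB l i (i + 1) = runB l i (i + 2) := by
          conv_lhs => rw [runB]
          rw [if_pos ⟨hn, hpair.symm⟩]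
        by_cases hend : i + 1 < l.length - 1
        · have hn2 : i + 2 < l.length := by omega
          by_cases hpair2 : l.getD (i + 1) ' ' = l.getD (i + 2) ' '
          · -- run of length ≥ 3: A skips to the run end i', B's scan stops there too
            have hstep : loopA l (i + 1) 1 = loopA l (innerA l (i + 2)) 0 := by
              conv_lhs => rw [loopA]
              rw [if_pos hend]
              simp only [show i + 1 + 1 = i + 2 from rfl, if_true]
              rw [if_pos hpair2]
              exact loopA_restart l (innerA l (i + 2))
            have hge : i + 3 ≤ innerA l (i + 2) := by
              have h1 : innerA l (i + 2) = innerA l (i + 3) := by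
                conv_lhs => rw [innerA]
                rw [if_pos ⟨hn2, by simpa using hpair2.symm⟩]
              have h2 := innerA_ge l (i + 3)
              omega
            have hrun : runB l i i = innerA l (i + 2) := by
              rw [s1, s2]
              exact runB_eq_innerA l i (i + 2) (by simpa using hpair.symm)
            have hB : loopB l i = loopB l (innerA l (i + 2)) := by
              conv_lhs => rw [loopB]
              rw [dif_pos (show i < l.length by omega)]
              simp only [hrun]
              rw [if_neg (by omega)]
            rw [hA, hstep, hB]
            exact ih (innerA l (i + 2)) (by omega)
          · -- run of length exactly 2: both return 1
            have hA2 : loopA l (i + 1) 1 = 1 := by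
              conv_lhs => rw [loopA]
              rw [if_pos hend, if_pos rfl, if_neg hpair2]
            have hrun : runB l i i = i + 2 := by
              rw [s1, s2]
              conv_lhs => rw [runB]
              rw [if_neg (by intro h; exact hpair2 (hpair.symm.trans h.2.symm))]
            rw [hA, hA2]
            conv_rhs => rw [loopB]
            rw [dif_pos (show i < l.length by omega)]
            simp only [hrun]
            rw [if_pos (by omega)]
        · -- the pair sits at the very end of the string: A's loop exits with flag 1
          have hn2 : l.length = i + 2 := by omega
          have hA2 : loopA l (i + 1) 1 = 1 := by
            conv_lhs => rw [loopA]
            rw [if_neg hend]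
          have hrun : runB l i i = i + 2 := by
            rw [s1, s2]
            conv_lhs => rw [runB]
            rw [if_neg (by omega)]
          rw [hA, hA2]
          conv_rhs => rw [loopB]
          rw [dif_pos (show i < l.length by omega)]
          simp only [hrun]
          rw [if_pos (by omega)]
      · -- no pair at i: both advance by one
        have hA : loopA l i 0 = loopA l (i + 1) 0 := by
          conv_lhs => rw [loopA]
          rw [if_pos hlt, if_neg (by norm_num), if_neg (by intro h; exact hpair h.2)]
        have hrun : runB l i i = i + 1 := by
          rw [s1]
          conv_lhs => rw [runB]
          rw [if_neg (by intro h; exact hpair h.2.symm)]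
        have hB : loopB l i = loopB l (i + 1) := by
          conv_lhs => rw [loopB]
          rw [dif_pos (show i < l.length by omega)]
          simp only [hrun]
          rw [if_neg (by omega)]
        rw [hA, hB]
        exact ih (i + 1) (by omega)
    · -- A's loop condition fails immediately: result 0
      have hA : loopA l i 0 = 0 := by
        conv_lhs => rw [loopA]
        rw [if_neg hlt]
      rw [hA]
      by_cases hi : i < l.length
      · have hlen : l.length = i + 1 := by omega
        have hrun : runB l i i = i + 1 := by
          conv_lhs => rw [runB]
          rw [if_pos ⟨hi, rfl⟩]
          conv_lhs => rw [runB]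
          rw [if_neg (by omega)]
        conv_rhs => rw [loopB]
        rw [dif_pos hi]
        simp only [hrun]
        rw [if_neg (by omega)]
        conv_rhs => rw [loopB]
        rw [dif_neg (by omega)]
      · conv_rhs => rw [loopB]
        rw [dif_neg hi]

theorem loopA_eq_loopB (l : List Char) (i : Nat) : loopA l i 0 = loopB l i :=
  loopA_eq_loopB_fuel l (l.length - i) i (Nat.le_refl _)

-- ===== VERDICT (by name: the statement is the Claim_ definition above) =====
theorem repeating2_spec : Claim_equal_repeating2 := by
  intro a _
  unfold Spec_repeating2 repeating2 repeating2_alt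
  exact loopA_eq_loopB a.toList 0
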